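-- pv_equiv track=rewrite | github.com/johndenim/Blood-Tax-Bot | main.py | choose_tax_and_limit
-- ===== SOURCE A (Python) =====
-- import itertools
--
-- def get_totals(p1, p2):
--     return [a + b for a, b in itertools.product(p1, p2)]
--
-- def choose_tax_and_limit(p1, p2, last_tax):
--     totals = get_totals(p1, p2)
--     unique = sorted(set(totals))
--
--     best_score = -999
--     best = None
--
--     for tax in unique:
--         for window in range(1, 5):
--             limit = tax + window
--
--             unpaid = sum(1 for t in totals if t < tax)
--             safe = sum(1 for t in totals if tax <= t <= limit)
--             overflow = sum(1 for t in totals if t > limit)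
--
--             if unpaid == 0 or safe == 0 or overflow == 0:
--                 continue
--
--             repeat_penalty = 3 if tax == last_tax else 0
--
--             score = min(unpaid, safe, overflow) * 3 - abs(safe - 2) - repeat_penalty
--
--             if score > best_score:
--                 best_score = score
--                 best = (tax, limit)
--
--     if best is None:
--         tax = min(unique)
--         return tax, max(unique)
--
--     return best
-- ===== SOURCE B (Python) =====
-- def _bisect_left(a, x):
--     lo, hi = 0, len(a)
--     while lo < hi:
--         mid = (lo + hi) // 2
--         if a[mid] < x:
--             lo = mid + 1
--         else:
--             hi = mid
--     return lo
--
-- def _bisect_right(a, x):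
--     lo, hi = 0, len(a)
--     while lo < hi:
--         mid = (lo + hi) // 2
--         if a[mid] <= x:
--             lo = mid + 1
--         else:
--             hi = mid
--     return lo
--
-- def choose_tax_and_limit(p1, p2, last_tax):
--     totals = [a + b for a in p1 for b in p2]
--     s = sorted(totals)
--     n = len(s)
--     unique = sorted(set(totals))
--
--     best_score = -999
--     best = None
--
--     for tax in unique:
--         lo = _bisect_left(s, tax)          # count of totals strictly below tax
--         for window in range(1, 5):
--             limit = tax + window
--             hi = _bisect_right(s, limit)   # count of totals at most limit
--             unpaid = lo
--             safe = hi - lo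
--             overflow = n - hi
--             if unpaid == 0 or safe == 0 or overflow == 0:
--                 continue
--             repeat_penalty = 3 if tax == last_tax else 0
--             score = min(unpaid, safe, overflow) * 3 - abs(safe - 2) - repeat_penalty
--             if score > best_score:
--                 best_score = score
--                 best = (tax, limit)
--
--     if best is None:
--         return unique[0], unique[-1]
--     return best
-- ===== Notes on version B (the rewrite author's own statement) =====
-- stated objective: faster
-- what changed: Instead of recounting unpaid/safe/overflow by three O(n) scans of totals for every (tax, window) pair, B sorts the totals once and obtains each count from hand-rolled binary searches (prefix counts) on the sorted list.
-- outside the precondition, e.g. on choose_tax_and_limit([], [1], 0): A raises ValueError, B raises IndexError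
import Mathlib
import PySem

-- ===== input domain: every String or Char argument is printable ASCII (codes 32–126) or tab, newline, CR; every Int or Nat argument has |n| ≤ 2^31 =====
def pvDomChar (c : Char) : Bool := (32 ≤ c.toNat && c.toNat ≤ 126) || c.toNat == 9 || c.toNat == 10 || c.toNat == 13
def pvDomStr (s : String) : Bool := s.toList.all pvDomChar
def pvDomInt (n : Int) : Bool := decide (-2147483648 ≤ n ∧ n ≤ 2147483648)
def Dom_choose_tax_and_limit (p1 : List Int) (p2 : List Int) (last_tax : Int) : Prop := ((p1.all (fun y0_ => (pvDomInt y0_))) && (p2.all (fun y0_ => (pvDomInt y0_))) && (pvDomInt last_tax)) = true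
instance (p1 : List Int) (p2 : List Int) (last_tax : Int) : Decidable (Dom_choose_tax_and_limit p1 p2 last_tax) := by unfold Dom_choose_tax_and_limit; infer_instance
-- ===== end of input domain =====

-- B replaces A's four O(n) scans per (tax, window) pair by one sort of the totals plus
-- hand-rolled binary searches (prefix counts), an asymptotic speed-up; same result.

-- ===== PORT A =====
def get_totals (p1 : List Int) (p2 : List Int) : List Int :=
  p1.flatMap (fun a => p2.map (fun b => a + b))   -- [a + b for a, b in itertools.product(p1, p2)]

-- body of the inner `for window in range(1, 5)` loop of A
-- (sum(1 for t in totals if P t) is the count of elements of totals satisfying P)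
def pvInnerA (totals : List Int) (last_tax : Int) (tax : Int)
    (st : Int × Option (Int × Int)) (window : Int) : Int × Option (Int × Int) :=
  let limit := tax + window
  let unpaid : Int := (totals.countP (fun t => decide (t < tax)) : Int)
  let safe : Int := (totals.countP (fun t => decide (tax ≤ t ∧ t ≤ limit)) : Int)
  let overflow : Int := (totals.countP (fun t => decide (limit < t)) : Int)
  if unpaid = 0 ∨ safe = 0 ∨ overflow = 0 then st
  else
    let repeat_penalty : Int := if tax = last_tax then 3 else 0
    let score := min (min unpaid safe) overflow * 3 - |safe - 2| - repeat_penalty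
    if score > st.1 then (score, some (tax, limit)) else st

def choose_tax_and_limit (p1 : List Int) (p2 : List Int) (last_tax : Int) : List Int :=
  let totals := get_totals p1 p2
  let unique := PySem.List.sorted (PySem.Set.ofList totals) (fun x => x)
  let st := unique.foldl
    (fun st tax => (PySem.List.pyRange 1 5 1).foldl (pvInnerA totals last_tax tax) st)
    ((-999 : Int), (none : Option (Int × Int)))
  match st.2 with
  | some (tax, limit) => [tax, limit]
  | none =>
    match PySem.List.min? unique (fun x => x), PySem.List.max? unique (fun x => x) with
    | some a, some b => [a, b]
    | _, _ => []          -- min()/max() of an empty list: Python raises (outside Pre_)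

-- ===== PORT B =====
-- _bisect_left / _bisect_right of Source B: the while loop, with fuel = len(a) (enough:
-- hi - lo at least halves each iteration)
def pvBLLoop (a : List Int) (x : Int) : Nat → Nat → Nat → Nat
  | 0, lo, _ => lo
  | fuel + 1, lo, hi =>
    if lo < hi then
      match a[(lo + hi) / 2]? with
      | some v => if v < x then pvBLLoop a x fuel ((lo + hi) / 2 + 1) hi
                  else pvBLLoop a x fuel lo ((lo + hi) / 2)
      | none => lo
    else lo

def pvBRLoop (a : List Int) (x : Int) : Nat → Nat → Nat → Nat
  | 0, lo, _ => lo
  | fuel + 1, lo, hi =>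
    if lo < hi then
      match a[(lo + hi) / 2]? with
      | some v => if v ≤ x then pvBRLoop a x fuel ((lo + hi) / 2 + 1) hi
                  else pvBRLoop a x fuel lo ((lo + hi) / 2)
      | none => lo
    else lo

def pvBisectLeft (a : List Int) (x : Int) : Nat := pvBLLoop a x a.length 0 a.length
def pvBisectRight (a : List Int) (x : Int) : Nat := pvBRLoop a x a.length 0 a.length

-- body of the inner `for window in range(1, 5)` loop of B
def pvInnerB (s : List Int) (last_tax : Int) (tax : Int) (lo : Nat)
    (st : Int × Option (Int × Int)) (window : Int) : Int × Option (Int × Int) :=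
  let limit := tax + window
  let hi := pvBisectRight s limit
  let unpaid : Int := (lo : Int)
  let safe : Int := (hi : Int) - (lo : Int)
  let overflow : Int := (s.length : Int) - (hi : Int)
  if unpaid = 0 ∨ safe = 0 ∨ overflow = 0 then st
  else
    let repeat_penalty : Int := if tax = last_tax then 3 else 0
    let score := min (min unpaid safe) overflow * 3 - |safe - 2| - repeat_penalty
    if score > st.1 then (score, some (tax, limit)) else st

def choose_tax_and_limit_alt (p1 : List Int) (p2 : List Int) (last_tax : Int) : List Int :=
  let totals := p1.flatMap (fun a => p2.map (fun b => a + b))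
  let s := PySem.List.sorted totals (fun x => x)
  let unique := PySem.List.sorted (PySem.Set.ofList totals) (fun x => x)
  let st := unique.foldl
    (fun st tax => (PySem.List.pyRange 1 5 1).foldl (pvInnerB s last_tax tax (pvBisectLeft s tax)) st)
    ((-999 : Int), (none : Option (Int × Int)))
  match st.2 with
  | some (tax, limit) => [tax, limit]
  | none => [PySem.List.pyGetD unique 0 0, PySem.List.pyGetD unique (-1) 0]  -- unique[0], unique[-1]

-- ===== PRECONDITION & SPEC =====
-- Pre_ excludes empty p1 or p2: there A raises ValueError on min([]) (and B raises IndexError).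
def Pre_choose_tax_and_limit (p1 : List Int) (p2 : List Int) (last_tax : Int) : Prop :=
  p1 ≠ [] ∧ p2 ≠ []
instance (p1 : List Int) (p2 : List Int) (last_tax : Int) : Decidable (Pre_choose_tax_and_limit p1 p2 last_tax) := by unfold Pre_choose_tax_and_limit; infer_instance

def pvWitness_choose_tax_and_limit : List Int × List Int × Int := ([0, 3], [1], 2)

def Spec_choose_tax_and_limit (p1 : List Int) (p2 : List Int) (last_tax : Int) (out : List Int) : Prop := out = choose_tax_and_limit_alt p1 p2 last_tax
instance (p1 : List Int) (p2 : List Int) (last_tax : Int) (out : List Int) : Decidable (Spec_choose_tax_and_limit p1 p2 last_tax out) := by unfold Spec_choose_tax_and_limit; infer_instance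

-- ===== CLAIM (what is proved, stated in full; the proofs are below) =====
def Claim_equal_choose_tax_and_limit : Prop := ∀ (p1 : List Int) (p2 : List Int) (last_tax : Int), Dom_choose_tax_and_limit p1 p2 last_tax → Pre_choose_tax_and_limit p1 p2 last_tax → Spec_choose_tax_and_limit p1 p2 last_tax (choose_tax_and_limit p1 p2 last_tax)

-- ===== LEMMAS AND PROOFS =====

theorem pvBLLoop_eq (a : List Int) (x : Int) (fuel : Nat) : ∀ (lo hi : Nat),
    pvBLLoop a x fuel lo hi = PySem.List.bisectLeftLoop a x fuel lo hi := by
  induction fuel with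
  | zero => intro lo hi; rfl
  | succ f ih =>
    intro lo hi
    simp only [pvBLLoop, PySem.List.bisectLeftLoop]
    split_ifs with h
    · cases h' : a[(lo + hi) / 2]? with
      | none => rfl
      | some v => by_cases hv : v < x <;> simp [hv, ih]
    · rfl

theorem pvBRLoop_eq (a : List Int) (x : Int) (fuel : Nat) : ∀ (lo hi : Nat),
    pvBRLoop a x fuel lo hi = PySem.List.bisectRightLoop a x fuel lo hi := by
  induction fuel with
  | zero => intro lo hi; rfl
  | succ f ih =>
    intro lo hi
    simp only [pvBRLoop, PySem.List.bisectRightLoop]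
    split_ifs with h
    · cases h' : a[(lo + hi) / 2]? with
      | none => rfl
      | some v => by_cases hv : v ≤ x <;> simp [hv, ih]
    · rfl

theorem pvBisectLeft_eq (a : List Int) (x : Int) :
    pvBisectLeft a x = PySem.List.bisectLeft a x := by
  simp [pvBisectLeft, PySem.List.bisectLeft, pvBLLoop_eq]

theorem pvBisectRight_eq (a : List Int) (x : Int) :
    pvBisectRight a x = PySem.List.bisectRight a x := by
  simp [pvBisectRight, PySem.List.bisectRight, pvBRLoop_eq]

-- a count characterised by a prefix property of the list
theorem countP_eq_of_prefix (p : Int → Bool) (s : List Int) (k : Nat) (hk : k ≤ s.length)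
    (h1 : ∀ (j : Nat) (hj : j < s.length), j < k → p s[j])
    (h2 : ∀ (j : Nat) (hj : j < s.length), k ≤ j → ¬ p s[j]) :
    s.countP p = k := by
  have hsplit : s = s.take k ++ s.drop k := (List.take_append_drop k s).symm
  rw [hsplit, List.countP_append]
  have ht : (s.take k).countP p = (s.take k).length := by
    rw [List.countP_eq_length]
    intro a ha
    rw [List.mem_take_iff_getElem] at ha
    obtain ⟨i, hi, rfl⟩ := ha
    exact h1 i (by omega) (by omega)
  have hd : (s.drop k).countP p = 0 := by
    rw [List.countP_eq_zero]
    intro a ha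
    rw [List.mem_drop_iff_getElem] at ha
    obtain ⟨i, hi, rfl⟩ := ha
    exact h2 (k + i) (by omega) (by omega)
  rw [ht, hd, List.length_take]
  omega

theorem bisectLeft_count (s : List Int) (x : Int) (hs : s.Pairwise (· ≤ ·)) :
    s.countP (fun t => decide (t < x)) = PySem.List.bisectLeft s x := by
  obtain ⟨hk, h1, h2⟩ := PySem.List.bisectLeft_spec s x hs
  refine countP_eq_of_prefix _ s _ hk (fun j hj hjk => by simpa using h1 j hj hjk)
    (fun j hj hjk => by simpa using not_lt.mpr (h2 j hj hjk))

theorem bisectRight_count (s : List Int) (x : Int) (hs : s.Pairwise (· ≤ ·)) :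
    s.countP (fun t => decide (t ≤ x)) = PySem.List.bisectRight s x := by
  obtain ⟨hk, h1, h2⟩ := PySem.List.bisectRight_spec s x hs
  refine countP_eq_of_prefix _ s _ hk (fun j hj hjk => by simpa using h1 j hj hjk)
    (fun j hj hjk => by simpa using not_le.mpr (h2 j hj hjk))

theorem count_split (l : List Int) (tax limit : Int) (h : tax ≤ limit) :
    l.countP (fun t => decide (t ≤ limit))
      = l.countP (fun t => decide (t < tax)) + l.countP (fun t => decide (tax ≤ t ∧ t ≤ limit)) := by
  induction l with
  | nil => simp
  | cons a t ih =>
    simp only [List.countP_cons, ih, decide_eq_true_eq]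
    split_ifs <;> omega

theorem count_total (l : List Int) (limit : Int) :
    l.countP (fun t => decide (t ≤ limit)) + l.countP (fun t => decide (limit < t)) = l.length := by
  induction l with
  | nil => simp
  | cons a t ih =>
    simp only [List.countP_cons, List.length_cons, ih.symm, decide_eq_true_eq]
    split_ifs <;> omega

theorem inner_eq (totals : List Int) (last_tax tax : Int) (st : Int × Option (Int × Int))
    (window : Int) (hw : 1 ≤ window) :
    pvInnerA totals last_tax tax st window
      = pvInnerB (PySem.List.sorted totals (fun x => x)) last_tax tax
          (pvBisectLeft (PySem.List.sorted totals (fun x => x)) tax) st window := by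
  have hs : (PySem.List.sorted totals (fun x => x)).Pairwise (· ≤ ·) :=
    PySem.List.sorted_pairwise totals (fun x => x)
  have hperm : (PySem.List.sorted totals (fun x => x)).Perm totals :=
    PySem.List.sorted_perm totals (fun x => x) false
  have hlo : pvBisectLeft (PySem.List.sorted totals (fun x => x)) tax
      = totals.countP (fun t => decide (t < tax)) := by
    rw [pvBisectLeft_eq, ← bisectLeft_count _ tax hs, hperm.countP_eq]
  have hhi : pvBisectRight (PySem.List.sorted totals (fun x => x)) (tax + window)
      = totals.countP (fun t => decide (t ≤ tax + window)) := by
    rw [pvBisectRight_eq, ← bisectRight_count _ (tax + window) hs, hperm.countP_eq]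
  have hlen : (PySem.List.sorted totals (fun x => x)).length = totals.length := hperm.length_eq
  have hsp := count_split totals tax (tax + window) (by omega)
  have hto := count_total totals (tax + window)
  have h1 : (totals.countP (fun t => decide (t < tax)) : Int)
      = ((pvBisectLeft (PySem.List.sorted totals (fun x => x)) tax : Nat) : Int) := by
    rw [hlo]
  have h2 : (totals.countP (fun t => decide (tax ≤ t ∧ t ≤ tax + window)) : Int)
      = ((pvBisectRight (PySem.List.sorted totals (fun x => x)) (tax + window) : Nat) : Int)
        - ((pvBisectLeft (PySem.List.sorted totals (fun x => x)) tax : Nat) : Int) := by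
    rw [hlo, hhi]; omega
  have h3 : (totals.countP (fun t => decide (tax + window < t)) : Int)
      = (((PySem.List.sorted totals (fun x => x)).length : Nat) : Int)
        - ((pvBisectRight (PySem.List.sorted totals (fun x => x)) (tax + window) : Nat) : Int) := by
    rw [hhi, hlen]; omega
  simp only [pvInnerA, pvInnerB]
  rw [h1, h2, h3]

theorem fold_eq (totals : List Int) (last_tax : Int) :
    (PySem.List.sorted (PySem.Set.ofList totals) (fun x => x)).foldl
      (fun st tax => (PySem.List.pyRange 1 5 1).foldl (pvInnerA totals last_tax tax) st)
      ((-999 : Int), (none : Option (Int × Int)))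
    = (PySem.List.sorted (PySem.Set.ofList totals) (fun x => x)).foldl
      (fun st tax => (PySem.List.pyRange 1 5 1).foldl
          (pvInnerB (PySem.List.sorted totals (fun x => x)) last_tax tax
            (pvBisectLeft (PySem.List.sorted totals (fun x => x)) tax)) st)
      ((-999 : Int), (none : Option (Int × Int))) := by
  apply PySem.List.foldl_congr_mem
  intro st tax htax
  apply PySem.List.foldl_congr_mem
  intro st' w hw
  exact inner_eq totals last_tax tax st' w (PySem.List.mem_pyRange_one.mp hw).1

theorem head_le_of_pairwise_lt (l : List Int) (h : l ≠ []) (hp : l.Pairwise (· < ·)) :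
    ∀ y ∈ l, l.head h ≤ y := by
  cases l with
  | nil => simp at h
  | cons a t =>
    intro y hy
    rcases List.mem_cons.mp hy with rfl | hy'
    · simp
    · exact le_of_lt ((List.pairwise_cons.mp hp).1 y hy')

theorem le_getLast_of_pairwise_lt (l : List Int) (h : l ≠ []) (hp : l.Pairwise (· < ·)) :
    ∀ y ∈ l, y ≤ l.getLast h := by
  induction l with
  | nil => simp at h
  | cons a t ih =>
    intro y hy
    cases t with
    | nil => simp at hy; simp [hy, List.getLast]
    | cons b u =>
      have htne : (b :: u) ≠ [] := by simp
      rw [List.getLast_cons htne]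
      rcases List.mem_cons.mp hy with rfl | hy'
      · exact le_of_lt ((List.pairwise_cons.mp hp).1 _ (List.getLast_mem htne))
      · exact ih htne (List.pairwise_cons.mp hp).2 y hy'

theorem min?_of_pairwise_lt (l : List Int) (h : l ≠ []) (hp : l.Pairwise (· < ·)) :
    PySem.List.min? l (fun x => x) = some (l.head h) := by
  cases hm : PySem.List.min? l (fun x => x) with
  | none => exact absurd ((PySem.List.min?_eq_none_iff _ _).mp hm) h
  | some m =>
    have hmem := PySem.List.min?_mem hm
    have hmin := PySem.List.min?_isMin hm
    have h1 : m ≤ l.head h := hmin _ (List.head_mem h)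
    have h2 : l.head h ≤ m := head_le_of_pairwise_lt l h hp m hmem
    simp [le_antisymm h1 h2]

theorem max?_of_pairwise_lt (l : List Int) (h : l ≠ []) (hp : l.Pairwise (· < ·)) :
    PySem.List.max? l (fun x => x) = some (l.getLast h) := by
  cases hm : PySem.List.max? l (fun x => x) with
  | none => exact absurd ((PySem.List.max?_eq_none_iff _ _).mp hm) h
  | some m =>
    have hmem := PySem.List.max?_mem hm
    have hmax := PySem.List.max?_isMax hm
    have h1 : l.getLast h ≤ m := hmax _ (List.getLast_mem h)
    have h2 : m ≤ l.getLast h := le_getLast_of_pairwise_lt l h hp m hmem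
    simp [le_antisymm h2 h1]

-- ===== VERDICT (by name: the statement is the Claim_ definition above) =====
theorem choose_tax_and_limit_spec : Claim_equal_choose_tax_and_limit := by
  intro p1 p2 last_tax _hdom hpre
  obtain ⟨h1, h2⟩ := hpre
  show choose_tax_and_limit p1 p2 last_tax = choose_tax_and_limit_alt p1 p2 last_tax
  simp only [choose_tax_and_limit, choose_tax_and_limit_alt, get_totals]
  rw [fold_eq]
  have htne : p1.flatMap (fun a => p2.map (fun b => a + b)) ≠ [] := by
    cases p1 with
    | nil => exact absurd rfl h1
    | cons a t =>
      cases p2 with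
      | nil => exact absurd rfl h2
      | cons b u => simp
  have hune : PySem.List.sorted (PySem.Set.ofList (p1.flatMap (fun a => p2.map (fun b => a + b)))) (fun x => x) ≠ [] := by
    rw [Ne, PySem.List.sorted_eq_nil_iff]
    intro hc
    apply htne
    rw [List.eq_nil_iff_forall_not_mem]
    intro x hx
    have : x ∈ PySem.Set.ofList (p1.flatMap (fun a => p2.map (fun b => a + b))) :=
      (PySem.Set.mem_ofList _ _).mpr hx
    simp [hc] at this
  have hpl := PySem.List.sorted_ofList_pairwise_lt (p1.flatMap (fun a => p2.map (fun b => a + b)))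
  cases hst : ((PySem.List.sorted (PySem.Set.ofList (p1.flatMap (fun a => p2.map (fun b => a + b)))) (fun x => x)).foldl
      (fun st tax => (PySem.List.pyRange 1 5 1).foldl
          (pvInnerB (PySem.List.sorted (p1.flatMap (fun a => p2.map (fun b => a + b))) (fun x => x)) last_tax tax
            (pvBisectLeft (PySem.List.sorted (p1.flatMap (fun a => p2.map (fun b => a + b))) (fun x => x)) tax)) st)
      ((-999 : Int), (none : Option (Int × Int)))).2 with
  | some v =>
    cases v with
    | mk tax limit => rfl
  | none =>
    rw [min?_of_pairwise_lt _ hune hpl, max?_of_pairwise_lt _ hune hpl,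
      PySem.List.pyGetD_neg_one _ _ hune, PySem.List.pyGetD_zero]
    obtain ⟨a, t, hu⟩ := List.exists_cons_of_ne_nil hune
    simp [hu]
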